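-- pv_equiv track=rewrite | github.com/i960107/algorithm | coding-test/2023_spring_dev_match_problem3.py | solution_greedy
-- ===== SOURCE A (Python) =====
-- from typing import List
--
-- def solution_greedy(queries: List[List[int]]) -> List[int]:
--     answer = []
--     for query in queries:
--         winnable = False
--         turn = get_required_count_to_make_palindrome(query)
--         if turn % 2 == 1:
--             answer.append(1)
--             continue
--         for index, x in enumerate(query):
--             if x != 0:
--                 temp = query.copy()
--                 temp[index] = x - 1
--                 turn = get_required_count_to_make_palindrome(temp)
--                 turn -= 1
--                 player = 1 if turn % 2 == 1 else 2
--                 if player == 1: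
--                     winnable = True
--                     break
--         answer.append(int(winnable))
--     return answer
--
-- def get_required_count_to_make_palindrome(query: List[int]) -> int:
--     n = len(query)
--     count = 0
--     for index in range(n // 2):
--         pair_index = n - 1 - index
--         count += abs(query[index] - query[pair_index])
--     return count
-- ===== SOURCE B (Python) =====
-- from typing import List
--
-- def solution_greedy(queries: List[List[int]]) -> List[int]:
--     # Closed-form: player 1 wins iff the mismatch count is odd, or (it is even and)
--     # the list has an odd length with a nonzero middle element: decrementing any
--     # paired element flips the mismatch parity, only the middle leaves it even.
--     answer = []
--     for query in queries:
--         n = len(query)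
--         count = sum(abs(query[i] - query[n - 1 - i]) for i in range(n // 2))
--         if count % 2 == 1:
--             answer.append(1)
--         elif n % 2 == 1 and query[n // 2] != 0:
--             answer.append(1)
--         else:
--             answer.append(0)
--     return answer
-- ===== Notes on version B (the rewrite author's own statement) =====
-- stated objective: faster
-- what changed: A's per-query inner loop (copy the list, decrement one entry, rescan the whole palindrome mismatch count for every index) is replaced by a closed-form test proved equivalent: player 1 wins iff the base mismatch count is odd, or the query has odd length with a nonzero middle element (decrementing any paired element flips the count's parity, only the middle leaves it even).
import Mathlib
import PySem

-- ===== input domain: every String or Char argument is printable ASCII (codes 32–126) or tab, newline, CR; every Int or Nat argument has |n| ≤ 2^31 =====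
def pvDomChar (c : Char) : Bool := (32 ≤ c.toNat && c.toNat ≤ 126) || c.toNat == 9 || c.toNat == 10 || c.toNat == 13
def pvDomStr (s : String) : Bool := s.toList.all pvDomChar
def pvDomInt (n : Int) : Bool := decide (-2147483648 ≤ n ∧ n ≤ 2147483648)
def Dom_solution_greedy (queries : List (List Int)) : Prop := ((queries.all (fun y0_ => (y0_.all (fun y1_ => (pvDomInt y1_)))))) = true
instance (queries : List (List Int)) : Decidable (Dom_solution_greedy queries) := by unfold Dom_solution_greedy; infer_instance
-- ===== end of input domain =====

-- B replaces A's quadratic per-query inner loop (copy the list, decrement one entry,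
-- rescan the palindrome count) by a closed-form O(n) test: parity of the base
-- mismatch count, else a nonzero middle element of an odd-length query.

-- ===== PORT A =====
-- get_required_count_to_make_palindrome; the query[index] accesses are in-range
-- nonnegative Python indexing (0 ≤ index < n//2 ≤ n-1-index < n), exact via pyGetD.
def grcA (query : List Int) : Int :=
  let n : Int := (query.length : Int)
  (PySem.List.pyRange 0 (PySem.Int.floordiv n 2) 1).foldl
    (fun count index =>
      count + |PySem.List.pyGetD query index 0 - PySem.List.pyGetD query (n - 1 - index) 0|) 0

-- the 'for index, x in enumerate(query)' loop with its break
def innerA (query : List Int) : List (Int × Int) → Bool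
  | [] => false
  | (index, x) :: rest =>
    if x ≠ 0 then
      let temp := PySem.List.pySetD query index (x - 1)
      let turn := grcA temp - 1
      let player : Int := if PySem.Int.mod turn 2 = 1 then 1 else 2
      if player = 1 then true else innerA query rest
    else innerA query rest

def solution_greedy (queries : List (List Int)) : List Int :=
  queries.foldl (fun answer query =>
    let turn := grcA query
    if PySem.Int.mod turn 2 = 1 then answer ++ [(1 : Int)]
    else answer ++ [if innerA query (PySem.List.enumerate query) then (1 : Int) else 0]) []

-- ===== PORT B =====
def solution_greedy_alt (queries : List (List Int)) : List Int :=
  queries.map (fun query =>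
    let n := query.length
    let count : Int := ((List.range (n / 2)).map
      (fun i => |query.getD i 0 - query.getD (n - 1 - i) 0|)).sum
    if count % 2 = 1 then (1 : Int)
    else if n % 2 = 1 ∧ query.getD (n / 2) 0 ≠ 0 then 1 else 0)

-- ===== PRECONDITION & SPEC =====
def Spec_solution_greedy (queries : List (List Int)) (out : List Int) : Prop := out = solution_greedy_alt queries
instance (queries : List (List Int)) (out : List Int) : Decidable (Spec_solution_greedy queries out) := by unfold Spec_solution_greedy; infer_instance

-- ===== CLAIM (what is proved, stated in full; the proofs are below) =====
def Claim_equal_solution_greedy : Prop := ∀ (queries : List (List Int)), Dom_solution_greedy queries → Spec_solution_greedy queries (solution_greedy queries)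

-- ===== LEMMAS AND PROOFS =====

-- the mismatch count, as a Finset sum (common reference form for both ports)
def pvS (q : List Int) : Int :=
  ∑ k ∈ Finset.range (q.length / 2), |q.getD k 0 - q.getD (q.length - 1 - k) 0|

lemma pv_listsum_eq_finsetsum (m : Nat) (f : Nat → Int) :
    ((List.range m).map f).sum = ∑ k ∈ Finset.range m, f k := by
  induction m with
  | zero => simp
  | succ n ih =>
    rw [List.range_succ, List.map_append, List.sum_append, Finset.sum_range_succ, ih]
    simp

lemma pv_getD_set_ne (l : List Int) (i k : Nat) (v : Int) (h : k ≠ i) :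
    (l.set i v).getD k 0 = l.getD k 0 := by
  simp [List.getD_eq_getElem?_getD, List.getElem?_set_ne (Ne.symm h)]

lemma pv_getD_set_self (l : List Int) (i : Nat) (v : Int) (hi : i < l.length) :
    (l.set i v).getD i 0 = v := by
  simp [List.getD_eq_getElem?_getD, hi]

lemma pv_abs_succ_parity (a b : Int) : (|a - 1 - b| + |a - b|) % 2 = 1 := by
  rcases abs_cases (a - 1 - b) with ⟨h1, h2⟩ | ⟨h1, h2⟩ <;>
    rcases abs_cases (a - b) with ⟨h3, h4⟩ | ⟨h3, h4⟩ <;> omega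

lemma pv_abs_pred_parity (a b : Int) : (|a - (b - 1)| + |a - b|) % 2 = 1 := by
  rcases abs_cases (a - (b - 1)) with ⟨h1, h2⟩ | ⟨h1, h2⟩ <;>
    rcases abs_cases (a - b) with ⟨h3, h4⟩ | ⟨h3, h4⟩ <;> omega

lemma grcA_eq_pvS (q : List Int) : grcA q = pvS q := by
  have hz : grcA q = (PySem.List.pyRange 0 (PySem.Int.floordiv ((q.length : Nat) : Int) 2) 1).foldl
      (fun count index =>
        count + |PySem.List.pyGetD q index 0 - PySem.List.pyGetD q (((q.length : Nat) : Int) - 1 - index) 0|) 0 := rfl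
  have hfd : PySem.Int.floordiv ((q.length : Nat) : Int) 2 = ((q.length / 2 : Nat) : Int) := by
    exact_mod_cast PySem.Int.floordiv_natCast q.length 2
  rw [hz, hfd, PySem.List.pyRange_one]
  unfold pvS
  have htn : (((q.length / 2 : Nat) : Int) - 0).toNat = q.length / 2 := by omega
  rw [htn, List.foldl_map, PySem.List.foldl_add, pv_listsum_eq_finsetsum]
  rw [zero_add]
  apply Finset.sum_congr rfl
  intro k hk
  have hk' : k < q.length / 2 := Finset.mem_range.mp hk
  have h1 : (0 : Int) + (k : Int) = (k : Int) := by ring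
  have h2 : ((q.length : Nat) : Int) - 1 - (k : Int)
      = ((q.length - 1 - k : Nat) : Int) := by omega
  rw [h1, h2, PySem.List.pyGetD_natCast, PySem.List.pyGetD_natCast]

lemma altCount_eq_pvS (q : List Int) :
    ((List.range (q.length / 2)).map
      (fun i => |q.getD i 0 - q.getD (q.length - 1 - i) 0|)).sum = pvS q := by
  rw [pv_listsum_eq_finsetsum]; rfl

-- setting the middle element of an odd-length list leaves the count unchanged
lemma pvS_set_middle (q : List Int) (v : Int) (h : q.length % 2 = 1) :
    pvS (q.set (q.length / 2) v) = pvS q := by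
  unfold pvS
  rw [List.length_set]
  apply Finset.sum_congr rfl
  intro k hk
  have hk' : k < q.length / 2 := Finset.mem_range.mp hk
  rw [pv_getD_set_ne _ _ _ _ (by omega), pv_getD_set_ne _ _ _ _ (by omega)]

-- decrementing any non-middle element flips the parity of the count
lemma pvS_set_flip (q : List Int) (i : Nat) (hi : i < q.length)
    (hmid : ¬(q.length % 2 = 1 ∧ i = q.length / 2)) :
    (pvS (q.set i (q.getD i 0 - 1)) + pvS q) % 2 = 1 := by
  unfold pvS
  rw [List.length_set]
  by_cases hlow : i < q.length / 2
  · have hmem : i ∈ Finset.range (q.length / 2) := Finset.mem_range.mpr hlow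
    rw [← Finset.sum_erase_add _ _ hmem, ← Finset.sum_erase_add _ _ hmem]
    have hE : ∑ k ∈ (Finset.range (q.length / 2)).erase i,
        |(q.set i (q.getD i 0 - 1)).getD k 0 - (q.set i (q.getD i 0 - 1)).getD (q.length - 1 - k) 0|
        = ∑ k ∈ (Finset.range (q.length / 2)).erase i,
        |q.getD k 0 - q.getD (q.length - 1 - k) 0| := by
      apply Finset.sum_congr rfl
      intro k hk
      obtain ⟨hne, hkr⟩ := Finset.mem_erase.mp hk
      have hkm : k < q.length / 2 := Finset.mem_range.mp hkr
      rw [pv_getD_set_ne _ _ _ _ hne, pv_getD_set_ne _ _ _ _ (by omega)]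
    rw [hE]
    rw [pv_getD_set_self _ _ _ hi, pv_getD_set_ne _ _ _ _ (by omega)]
    have habs := pv_abs_succ_parity (q.getD i 0) (q.getD (q.length - 1 - i) 0)
    omega
  · -- i is in the upper half; the affected pair index is k0 = n - 1 - i
    have hk0 : q.length - 1 - i < q.length / 2 := by omega
    have hmem : q.length - 1 - i ∈ Finset.range (q.length / 2) := Finset.mem_range.mpr hk0
    rw [← Finset.sum_erase_add _ _ hmem, ← Finset.sum_erase_add _ _ hmem]
    have hE : ∑ k ∈ (Finset.range (q.length / 2)).erase (q.length - 1 - i),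
        |(q.set i (q.getD i 0 - 1)).getD k 0 - (q.set i (q.getD i 0 - 1)).getD (q.length - 1 - k) 0|
        = ∑ k ∈ (Finset.range (q.length / 2)).erase (q.length - 1 - i),
        |q.getD k 0 - q.getD (q.length - 1 - k) 0| := by
      apply Finset.sum_congr rfl
      intro k hk
      obtain ⟨hne, hkr⟩ := Finset.mem_erase.mp hk
      have hkm : k < q.length / 2 := Finset.mem_range.mp hkr
      rw [pv_getD_set_ne _ _ _ _ (by omega), pv_getD_set_ne _ _ _ _ (by omega)]
    rw [hE]
    have hidx : q.length - 1 - (q.length - 1 - i) = i := by omega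
    rw [hidx]
    rw [pv_getD_set_ne _ _ _ _ (by omega), pv_getD_set_self _ _ _ hi]
    have habs := pv_abs_pred_parity (q.getD (q.length - 1 - i) 0) (q.getD i 0)
    omega

lemma innerA_eq_any (q : List Int) (l : List (Int × Int)) :
    innerA q l = l.any (fun p =>
      decide (p.2 ≠ 0 ∧ PySem.Int.mod (grcA (PySem.List.pySetD q p.1 (p.2 - 1)) - 1) 2 = 1)) := by
  induction l with
  | nil => rfl
  | cons p rest ih =>
    obtain ⟨index, x⟩ := p
    simp only [innerA, List.any_cons, ih]
    by_cases hx : x ≠ 0 <;> simp [hx]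

lemma enumerate_eq_map_range (q : List Int) (s : Int) :
    PySem.List.enumerate q s
      = (List.range q.length).map (fun (i : Nat) => ((s + (i : Int) : Int), q.getD i 0)) := by
  induction q generalizing s with
  | nil => simp [PySem.List.enumerate_nil]
  | cons a q ih =>
    rw [PySem.List.enumerate_cons, ih (s + 1), List.length_cons, List.range_succ_eq_map,
      List.map_cons, List.map_map]
    congr 1
    · simp
    · apply List.map_congr_left
      intro i hi
      simp only [Function.comp, List.getD_cons_succ, Nat.succ_eq_add_one, Prod.mk.injEq]
      refine ⟨by push_cast; ring, trivial⟩

lemma innerA_spec (q : List Int) (hbase : pvS q % 2 = 0) :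
    innerA q (PySem.List.enumerate q)
      = (decide (q.length % 2 = 1) && decide (q.getD (q.length / 2) 0 ≠ 0)) := by
  have hm : ∀ a : Int, PySem.Int.mod a 2 = a % 2 :=
    fun a => PySem.Int.mod_eq_emod_of_pos (by norm_num)
  have hbi : ∀ a b : Bool, (a = true ↔ b = true) → a = b := by decide
  rw [innerA_eq_any, enumerate_eq_map_range q 0, List.any_map]
  apply hbi
  simp only [List.any_eq_true, List.mem_range, Function.comp, decide_eq_true_eq,
    Bool.and_eq_true, zero_add, PySem.List.pySetD_natCast, grcA_eq_pvS, hm]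
  constructor
  · rintro ⟨i, hi, hx0, hcond⟩
    by_cases hmidc : q.length % 2 = 1 ∧ i = q.length / 2
    · exact ⟨hmidc.1, by rw [← hmidc.2]; exact hx0⟩
    · exfalso
      have hflip := pvS_set_flip q i hi hmidc
      omega
  · rintro ⟨hodd, hmid⟩
    refine ⟨q.length / 2, by omega, hmid, ?_⟩
    rw [pvS_set_middle q _ hodd]
    omega

lemma pv_foldl_shape (l : List (List Int)) (init : List Int) :
    l.foldl (fun answer query =>
      let turn := grcA query
      if PySem.Int.mod turn 2 = 1 then answer ++ [(1 : Int)]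
      else answer ++ [if innerA query (PySem.List.enumerate query) then (1 : Int) else 0]) init
    = init ++ l.map (fun query =>
      if PySem.Int.mod (grcA query) 2 = 1 then (1 : Int)
      else if innerA query (PySem.List.enumerate query) then (1 : Int) else 0) := by
  induction l generalizing init with
  | nil => simp
  | cons q rest ih =>
    simp only [List.foldl_cons, List.map_cons, ih]
    by_cases hc : PySem.Int.mod (grcA q) 2 = 1
    · rw [if_pos hc, if_pos hc]
      simp
    · rw [if_neg hc, if_neg hc]
      simp

lemma pv_perquery (q : List Int) :
    (if PySem.Int.mod (grcA q) 2 = 1 then (1 : Int)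
      else if innerA q (PySem.List.enumerate q) then (1 : Int) else 0)
    = (let n := q.length
       let count : Int := ((List.range (n / 2)).map
         (fun i => |q.getD i 0 - q.getD (n - 1 - i) 0|)).sum
       if count % 2 = 1 then (1 : Int)
       else if n % 2 = 1 ∧ q.getD (n / 2) 0 ≠ 0 then 1 else 0) := by
  have hm : PySem.Int.mod (grcA q) 2 = pvS q % 2 := by
    rw [grcA_eq_pvS]; exact PySem.Int.mod_eq_emod_of_pos (by norm_num)
  simp only [hm, altCount_eq_pvS]
  by_cases h1 : pvS q % 2 = 1
  · simp [h1]
  · have hbase : pvS q % 2 = 0 := by omega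
    rw [if_neg h1, if_neg h1, innerA_spec q hbase]
    by_cases h2 : q.length % 2 = 1 ∧ q.getD (q.length / 2) 0 ≠ 0
    · simp [h2.1]
      
    · have hb : ¬((decide (q.length % 2 = 1) && decide (q.getD (q.length / 2) 0 ≠ 0)) = true) := by
        simp only [Bool.and_eq_true, decide_eq_true_eq]
        exact fun h => h2 h
      rw [if_neg hb, if_neg h2]

-- ===== VERDICT (by name: the statement is the Claim_ definition above) =====
theorem solution_greedy_spec : Claim_equal_solution_greedy := by
  intro queries _
  unfold Spec_solution_greedy solution_greedy solution_greedy_alt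
  rw [pv_foldl_shape, List.nil_append]
  exact List.map_congr_left (fun q _ => pv_perquery q)
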